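-- pv_equiv track=rewrite | github.com/mbotnan/set-realizable | add_surjective.py | generate_all_permutations
-- ===== SOURCE A (Python) =====
-- import itertools
--
-- def generate_all_permutations(edge_list):
--     """
--     Generate all permutations by replacing [a, b] with [b, a] for each sublist.
--     """
--     # Generate all combinations of directions for edges
--     permutations = []
--     for combination in itertools.product([0, 1], repeat=len(edge_list)):
--         permuted_list = []
--         for idx, flip in enumerate(combination):
--             a, b, label = edge_list[idx]
--             if flip == 0:
--                 permuted_list.append([a, b, label])  # Original direction
--             else:
--                 permuted_list.append([b, a, label])  # Reversed direction
--         permutations.append(permuted_list)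
--     return permutations
-- ===== SOURCE B (Python) =====
-- def generate_all_permutations(edge_list):
--     """Incrementally branch each edge into (orig, reversed) instead of itertools.product."""
--     result = [[]]
--     for a, b, label in edge_list:
--         result = [p + [d] for p in result for d in ([a, b, label], [b, a, label])]
--     return result
-- ===== Notes on version B (the rewrite author's own statement) =====
-- stated objective: simpler
-- what changed: Replaces itertools.product over direction vectors plus an indexed inner rebuild loop with a single left-to-right fold that extends every partial list with the original and the reversed edge.
import Mathlib
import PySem

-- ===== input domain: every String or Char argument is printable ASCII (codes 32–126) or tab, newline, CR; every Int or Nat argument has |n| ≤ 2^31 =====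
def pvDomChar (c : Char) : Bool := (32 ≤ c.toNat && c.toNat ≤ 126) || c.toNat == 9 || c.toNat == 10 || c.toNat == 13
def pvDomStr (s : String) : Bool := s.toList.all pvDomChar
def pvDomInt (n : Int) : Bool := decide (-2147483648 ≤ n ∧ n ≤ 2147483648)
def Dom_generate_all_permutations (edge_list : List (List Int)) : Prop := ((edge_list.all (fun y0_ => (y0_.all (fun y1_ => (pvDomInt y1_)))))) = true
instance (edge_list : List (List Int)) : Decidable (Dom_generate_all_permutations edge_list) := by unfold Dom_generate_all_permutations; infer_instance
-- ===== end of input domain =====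

-- B replaces the itertools.product-driven double loop by one incremental fold (objective: simpler).

-- ===== PORT A =====
-- itertools.product([0, 1], repeat=n), in Python's order (last component varies fastest)
def pvProduct01 : Nat → List (List Int)
  | 0 => [[]]
  | n + 1 => (pvProduct01 n).flatMap (fun c => [c ++ [0], c ++ [1]])

-- the inner loop: for idx, flip in enumerate(combination): a, b, label = edge_list[idx]; …
-- (a row whose unpack into a, b, label would raise in Python is skipped here; Pre_ excludes those)
def pvPermutedRow (edge_list : List (List Int)) (combination : List Int) : List (List Int) :=
  (PySem.List.enumerate combination).foldl (fun (acc : List (List Int)) (p : Int × Int) =>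
    match PySem.List.pyGet? edge_list p.1 with
    | some [a, b, label] => acc ++ [if p.2 == 0 then [a, b, label] else [b, a, label]]
    | _ => acc) []

def generate_all_permutations (edge_list : List (List Int)) : List (List (List Int)) :=
  (pvProduct01 edge_list.length).foldl
    (fun permutations combination => permutations ++ [pvPermutedRow edge_list combination]) []

-- ===== PORT B =====
-- (a row that would fail Python's unpack yields [] here; Pre_ excludes those inputs)
def generate_all_permutations_alt (edge_list : List (List Int)) : List (List (List Int)) :=
  edge_list.foldl (fun result e =>
    match e with
    | [a, b, label] => result.flatMap (fun p => [p ++ [[a, b, label]], p ++ [[b, a, label]]])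
    | _ => []) [[]]

-- ===== PRECONDITION & SPEC =====
-- Pre_ excludes exactly the inputs where Python's unpack 'a, b, label = edge_list[idx]' raises ValueError:
-- some row does not have exactly three entries.
def Pre_generate_all_permutations (edge_list : List (List Int)) : Prop :=
  (edge_list.all (fun r => r.length == 3)) = true
instance (edge_list : List (List Int)) : Decidable (Pre_generate_all_permutations edge_list) := by
  unfold Pre_generate_all_permutations; infer_instance

def pvWitness_generate_all_permutations : List (List Int) := [[1, 2, 9], [3, 4, 8]]

def Spec_generate_all_permutations (edge_list : List (List Int)) (out : List (List (List Int))) : Prop := out = generate_all_permutations_alt edge_list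
instance (edge_list : List (List Int)) (out : List (List (List Int))) : Decidable (Spec_generate_all_permutations edge_list out) := by unfold Spec_generate_all_permutations; infer_instance

-- ===== CLAIM (what is proved, stated in full; the proofs are below) =====
def Claim_equal_generate_all_permutations : Prop := ∀ (edge_list : List (List Int)), Dom_generate_all_permutations edge_list → Pre_generate_all_permutations edge_list → Spec_generate_all_permutations edge_list (generate_all_permutations edge_list)

-- ===== LEMMAS AND PROOFS =====

theorem pvProduct01_length {n : Nat} {c : List Int} (h : c ∈ pvProduct01 n) : c.length = n := by
  induction n generalizing c with
  | zero => simp [pvProduct01] at h; simp [h]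
  | succ n ih =>
    simp only [pvProduct01, List.mem_flatMap, List.mem_cons,
      List.not_mem_nil, or_false] at h
    obtain ⟨d, hd, h⟩ := h
    rcases h with rfl | rfl <;> simp [ih hd]

theorem pvFlatMapCongr {α β : Type} {l : List α} {f g : α → List β}
    (h : ∀ x ∈ l, f x = g x) : l.flatMap f = l.flatMap g := by
  induction l with
  | nil => rfl
  | cons x xs ih =>
    simp only [List.flatMap_cons, h x (List.mem_cons_self), ih (fun y hy => h y (List.mem_cons_of_mem _ hy))]

theorem genA_eq_map (edge_list : List (List Int)) :
    generate_all_permutations edge_list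
      = (pvProduct01 edge_list.length).map (pvPermutedRow edge_list) := by
  unfold generate_all_permutations
  rw [PySem.List.foldl_append_singleton_eq_map, List.nil_append]

theorem permutedRow_snoc (xs : List (List Int)) (e : List Int) (c : List Int) (d : Int)
    (hlen : c.length = xs.length) :
    pvPermutedRow (xs ++ [e]) (c ++ [d])
      = pvPermutedRow xs c ++
        (match e with
         | [a, b, label] => [if d == 0 then [a, b, label] else [b, a, label]]
         | _ => []) := by
  unfold pvPermutedRow
  rw [PySem.List.enumerate_append, List.foldl_append]
  have hstep :
      (PySem.List.enumerate c 0).foldl (fun (acc : List (List Int)) (p : Int × Int) =>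
        match PySem.List.pyGet? (xs ++ [e]) p.1 with
        | some [a, b, label] => acc ++ [if p.2 == 0 then [a, b, label] else [b, a, label]]
        | _ => acc) []
      = (PySem.List.enumerate c 0).foldl (fun (acc : List (List Int)) (p : Int × Int) =>
        match PySem.List.pyGet? xs p.1 with
        | some [a, b, label] => acc ++ [if p.2 == 0 then [a, b, label] else [b, a, label]]
        | _ => acc) [] := by
    apply PySem.List.foldl_congr_mem
    intro acc p hp
    obtain ⟨k, hk, rfl⟩ := (PySem.List.mem_enumerate_iff _ _ _).1 hp
    have hget : PySem.List.pyGet? (xs ++ [e]) ((0 : Int) + k) = PySem.List.pyGet? xs ((0 : Int) + k) := by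
      have h0 : ((0 : Int) + k) = ((k : Int)) := by omega
      rw [h0, PySem.List.pyGet?_natCast, PySem.List.pyGet?_natCast,
        List.getElem?_append_left (by omega)]
    simp only [hget]
  rw [hstep]
  have hlast : PySem.List.pyGet? (xs ++ [e]) ((0 : Int) + (c.length : Int)) = some e := by
    have h0 : ((0 : Int) + (c.length : Int)) = ((xs.length : Int)) := by omega
    rw [h0, PySem.List.pyGet?_natCast]
    simp
  simp only [PySem.List.enumerate_cons, PySem.List.enumerate_nil, List.foldl_cons,
    List.foldl_nil, hlast]
  match e with
  | [] => simp
  | [a] => simp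
  | [a, b] => simp
  | [a, b, l] => rfl
  | a :: b :: l :: t :: r => simp

theorem genB_snoc3 (xs : List (List Int)) (a b label : Int) :
    generate_all_permutations_alt (xs ++ [[a, b, label]])
      = (generate_all_permutations_alt xs).flatMap
          (fun p => [p ++ [[a, b, label]], p ++ [[b, a, label]]]) := by
  unfold generate_all_permutations_alt
  rw [List.foldl_append]
  rfl

-- ===== VERDICT (by name: the statement is the Claim_ definition above) =====
theorem generate_all_permutations_spec : Claim_equal_generate_all_permutations := by
  unfold Claim_equal_generate_all_permutations Spec_generate_all_permutations
  intro edge_list hdom hpre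
  revert hdom hpre
  induction edge_list using List.reverseRecOn with
  | nil => intro _ _; rfl
  | append_singleton xs e ih =>
    intro hdom hpre
    have hdom' : Dom_generate_all_permutations xs := by
      unfold Dom_generate_all_permutations at hdom ⊢
      simp only [List.all_append, Bool.and_eq_true] at hdom
      exact hdom.1
    have hpre' : Pre_generate_all_permutations xs := by
      unfold Pre_generate_all_permutations at hpre ⊢
      simp_all
    have he : e.length = 3 := by
      unfold Pre_generate_all_permutations at hpre
      simp at hpre
      exact_mod_cast hpre.2
    obtain ⟨a, b, l, rfl⟩ : ∃ a b l, e = [a, b, l] := by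
      match e, he with
      | [a, b, l], _ => exact ⟨a, b, l, rfl⟩
    have ihx := ih hdom' hpre'
    rw [genA_eq_map, genB_snoc3]
    rw [genA_eq_map] at ihx
    rw [← ihx]
    have hlen : (xs ++ [[a, b, l]]).length = xs.length + 1 := by simp
    rw [hlen]
    rw [show pvProduct01 (xs.length + 1)
          = (pvProduct01 xs.length).flatMap (fun c => [c ++ [0], c ++ [1]]) from rfl,
      List.map_flatMap, List.flatMap_map]
    apply pvFlatMapCongr
    intro c hc
    have hl := pvProduct01_length hc
    simp only [List.map_cons, List.map_nil,
      permutedRow_snoc xs [a, b, l] c 0 hl, permutedRow_snoc xs [a, b, l] c 1 hl]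
    rfl
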